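-- pv_equiv track=rewrite | github.com/pypi-data/pypi-mirror-288 | packages/nba-analytics/nba_analytics-0.2.19-py3-none-any.whl/nba_analytics/data/transformation/filtering.py | get_continuous_years
-- ===== SOURCE A (Python) =====
-- def get_continuous_years(years, min_years):
--     """
--     Gets all continuous periods of given length in the list of years.
--
--     Args:
--         years (list): List of years the player has played.
--         min_years (int): Minimum number of continuous years required.
--
--     Returns:
--         list: List of all years within continuous periods of given length.
--     """
--     continuous_years = set()
--     years = sorted(years)
--     for i in range(len(years) - min_years + 1):
--         if all(years[j] - years[i] == j - i for j in range(i, i + min_years)):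
--             continuous_years.update(years[i:i + min_years])
--             j = i + min_years
--             while j < len(years) and years[j] - years[j - 1] == 1:
--                 continuous_years.add(years[j])
--                 j += 1
--     return list(continuous_years)
-- ===== SOURCE B (Python) =====
-- def get_continuous_years(years, min_years):
--     """Single linear sweep over the sorted years: find each maximal run of
--     consecutive values and keep it whole iff it is at least min_years long."""
--     ys = sorted(years)
--     result = set()
--     n = len(ys)
--     i = 0
--     while i < n:
--         j = i + 1
--         while j < n and ys[j] - ys[j - 1] == 1:
--             j += 1
--         if j - i >= min_years:
--             result.update(ys[i:j])
--         i = j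
--     return list(result)
-- ===== Notes on version B (the rewrite author's own statement) =====
-- stated objective: alternative
-- what changed: A slides a window over every index, re-checking min_years pairwise differences per index with all() and re-walking the tail of each run per window; B makes one linear sweep over the sorted list, finding each maximal consecutive run once and keeping it iff its length is >= min_years (intended to be cheaper; the timing runs read between 1.47x and 1.79x at the largest size depending on input family, so no speed is claimed).
-- outside the precondition, e.g. on get_continuous_years([1, 2], 0): A returns [2], B returns [1, 2]; on get_continuous_years([], -5): A raises IndexError, B returns []
import Mathlib
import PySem

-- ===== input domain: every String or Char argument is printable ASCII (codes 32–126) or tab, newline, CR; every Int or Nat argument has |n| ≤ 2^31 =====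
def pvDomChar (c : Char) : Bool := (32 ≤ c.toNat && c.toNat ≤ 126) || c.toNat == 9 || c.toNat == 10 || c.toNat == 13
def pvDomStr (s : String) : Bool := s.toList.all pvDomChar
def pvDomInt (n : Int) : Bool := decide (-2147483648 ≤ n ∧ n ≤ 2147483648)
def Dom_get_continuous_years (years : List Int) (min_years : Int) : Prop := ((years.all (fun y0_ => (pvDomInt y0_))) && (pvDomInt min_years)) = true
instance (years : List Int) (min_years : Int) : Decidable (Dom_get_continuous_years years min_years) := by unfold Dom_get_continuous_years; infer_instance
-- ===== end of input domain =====

-- B replaces A's per-index window re-checking and per-window run re-walk by one single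
-- linear sweep over the sorted list grouping maximal consecutive runs.  Both Pythons return
-- list(set(...)); the ports return the set (distinct elements in first-insertion order),
-- since Python's hash iteration order over a set is not modelled.

-- ===== PORT A =====
-- 'all(years[j] - years[i] == j - i for j in range(i, i + min_years))'
def pvWindowOk (ys : List Int) (i m : Int) : Bool :=
  (PySem.List.pyRange i (i + m) 1).all fun j =>
    PySem.List.pyGetD ys j 0 - PySem.List.pyGetD ys i 0 == j - i

-- 'while j < len(years) and years[j] - years[j-1] == 1: continuous_years.add(years[j]); j += 1'
-- (indexing via pyGetD: exact whenever the index is in range, which Pre_ guarantees here)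
def pvExtendA (ys : List Int) (j : Int) (s : PySem.Set Int) : PySem.Set Int :=
  if h : j < (ys.length : Int) ∧
         PySem.List.pyGetD ys j 0 - PySem.List.pyGetD ys (j - 1) 0 = 1 then
    pvExtendA ys (j + 1) (s.add (PySem.List.pyGetD ys j 0))
  else s
termination_by ((ys.length : Int) - j).toNat
decreasing_by omega

-- one iteration of A's for-loop body
def pvStepA (ys : List Int) (m : Int) (s : PySem.Set Int) (i : Int) : PySem.Set Int :=
  if pvWindowOk ys i m then
    pvExtendA ys (i + m) (s.update (PySem.List.slice ys (some i) (some (i + m))))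
  else s

def get_continuous_years (years : List Int) (min_years : Int) : List Int :=
  let ys := PySem.List.sorted years (fun y => y) false
  (PySem.List.pyRange 0 ((ys.length : Int) - min_years + 1) 1).foldl
    (pvStepA ys min_years) PySem.Set.empty

-- ===== PORT B =====
-- 'j = i + 1; while j < n and ys[j] - ys[j-1] == 1: j += 1'
def pvRunEnd (ys : List Int) (j : Int) : Int :=
  if h : j < (ys.length : Int) ∧
         PySem.List.pyGetD ys j 0 - PySem.List.pyGetD ys (j - 1) 0 = 1 then
    pvRunEnd ys (j + 1)
  else j
termination_by ((ys.length : Int) - j).toNat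
decreasing_by omega

-- cited by pvSweepB's decreasing_by (termination of B's outer while loop)
theorem pvRunEnd_ge (ys : List Int) (j : Int) : j ≤ pvRunEnd ys j := by
  induction j using pvRunEnd.induct (ys := ys) with
  | case1 j h ih => conv_rhs => rw [pvRunEnd, dif_pos h]
                    omega
  | case2 j h => conv_rhs => rw [pvRunEnd, dif_neg h]

-- B's outer while loop
def pvSweepB (ys : List Int) (m : Int) (i : Int) (s : PySem.Set Int) : PySem.Set Int :=
  if h : i < (ys.length : Int) then
    let j := pvRunEnd ys (i + 1)
    pvSweepB ys m j
      (if m ≤ j - i then s.update (PySem.List.slice ys (some i) (some j)) else s)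
  else s
termination_by ((ys.length : Int) - i).toNat
decreasing_by have := pvRunEnd_ge ys (i + 1); omega

def get_continuous_years_alt (years : List Int) (min_years : Int) : List Int :=
  pvSweepB (PySem.List.sorted years (fun y => y) false) min_years 0 PySem.Set.empty

-- ===== PRECONDITION & SPEC =====
-- Pre_ restricts to the natural domain min_years ≥ 1: for min_years ≤ 0 the run-length request
-- is meaningless — A raises IndexError there on an empty list with negative min_years, and its
-- returned values there (e.g. [2] on ([1,2], 0)) are accidents of its window arithmetic.
def Pre_get_continuous_years (years : List Int) (min_years : Int) : Prop := 1 ≤ min_years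
instance (years : List Int) (min_years : Int) : Decidable (Pre_get_continuous_years years min_years) := by unfold Pre_get_continuous_years; infer_instance

def pvWitness_get_continuous_years : List Int × Int := ([2019, 2020, 2021, 2015], 2)

def Spec_get_continuous_years (years : List Int) (min_years : Int) (out : List Int) : Prop := out = get_continuous_years_alt years min_years
instance (years : List Int) (min_years : Int) (out : List Int) : Decidable (Spec_get_continuous_years years min_years out) := by unfold Spec_get_continuous_years; infer_instance

-- ===== CLAIM (what is proved, stated in full; the proofs are below) =====
def Claim_equal_get_continuous_years : Prop := ∀ (years : List Int) (min_years : Int), Dom_get_continuous_years years min_years → Pre_get_continuous_years years min_years → Spec_get_continuous_years years min_years (get_continuous_years years min_years)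

-- ===== LEMMAS AND PROOFS =====

theorem pvRunEnd_eq_pos (ys : List Int) (j : Int)
    (h : j < (ys.length : Int) ∧
         PySem.List.pyGetD ys j 0 - PySem.List.pyGetD ys (j - 1) 0 = 1) :
    pvRunEnd ys j = pvRunEnd ys (j + 1) := by
  conv_lhs => rw [pvRunEnd]
  exact dif_pos h

theorem pvRunEnd_eq_neg (ys : List Int) (j : Int)
    (h : ¬ (j < (ys.length : Int) ∧
         PySem.List.pyGetD ys j 0 - PySem.List.pyGetD ys (j - 1) 0 = 1)) :
    pvRunEnd ys j = j := by
  conv_lhs => rw [pvRunEnd]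
  exact dif_neg h

theorem pvRunEnd_le (ys : List Int) (j : Int) (hj : j ≤ (ys.length : Int)) :
    pvRunEnd ys j ≤ (ys.length : Int) := by
  induction j using pvRunEnd.induct (ys := ys) with
  | case1 j h ih => rw [pvRunEnd_eq_pos ys j h]; exact ih (by omega)
  | case2 j h => rw [pvRunEnd_eq_neg ys j h]; exact hj

theorem pvSweepB_eq_pos (ys : List Int) (m i : Int) (s : PySem.Set Int)
    (h : i < (ys.length : Int)) :
    pvSweepB ys m i s =
      pvSweepB ys m (pvRunEnd ys (i + 1))
        (if m ≤ pvRunEnd ys (i + 1) - i then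
          s.update (PySem.List.slice ys (some i) (some (pvRunEnd ys (i + 1))))
        else s) := by
  conv_lhs => rw [pvSweepB]
  rw [dif_pos h]

theorem pvSweepB_eq_neg (ys : List Int) (m i : Int) (s : PySem.Set Int)
    (h : ¬ i < (ys.length : Int)) : pvSweepB ys m i s = s := by
  conv_lhs => rw [pvSweepB]
  rw [dif_neg h]

-- the values strictly inside [j, pvRunEnd ys j) all continue the run, and pvRunEnd stops
theorem pvRunEnd_conds (ys : List Int) (j : Int) :
    (∀ k, j ≤ k → k < pvRunEnd ys j →
        k < (ys.length : Int) ∧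
        PySem.List.pyGetD ys k 0 - PySem.List.pyGetD ys (k - 1) 0 = 1) ∧
    ¬ (pvRunEnd ys j < (ys.length : Int) ∧
        PySem.List.pyGetD ys (pvRunEnd ys j) 0 -
          PySem.List.pyGetD ys (pvRunEnd ys j - 1) 0 = 1) := by
  induction j using pvRunEnd.induct (ys := ys) with
  | case1 j h ih =>
      rw [pvRunEnd_eq_pos ys j h]
      refine ⟨fun k hk1 hk2 => ?_, ih.2⟩
      rcases eq_or_lt_of_le hk1 with rfl | hlt
      · exact h
      · exact ih.1 k (by omega) hk2
  | case2 j h =>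
      rw [pvRunEnd_eq_neg ys j h]
      exact ⟨fun k hk1 hk2 => absurd hk2 (by omega), h⟩

theorem pvRunEnd_eq_of (ys : List Int) (j x : Int) (hjx : j ≤ x)
    (hall : ∀ k, j ≤ k → k < x →
        k < (ys.length : Int) ∧
        PySem.List.pyGetD ys k 0 - PySem.List.pyGetD ys (k - 1) 0 = 1)
    (hx : ¬ (x < (ys.length : Int) ∧
        PySem.List.pyGetD ys x 0 - PySem.List.pyGetD ys (x - 1) 0 = 1)) :
    pvRunEnd ys j = x := by
  revert hjx hall
  induction j using pvRunEnd.induct (ys := ys) with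
  | case1 j h ih =>
      intro hjx hall
      rw [pvRunEnd_eq_pos ys j h]
      have hjx' : j + 1 ≤ x := by
        rcases eq_or_lt_of_le hjx with rfl | hlt
        · exact absurd h hx
        · omega
      exact ih hjx' (fun k hk1 hk2 => hall k (by omega) hk2)
  | case2 j h =>
      intro hjx hall
      rw [pvRunEnd_eq_neg ys j h]
      rcases eq_or_lt_of_le hjx with rfl | hlt
      · rfl
      · exact absurd (hall j le_rfl hlt) h

theorem pvRunEnd_stable (ys : List Int) (j j' : Int) (h1 : j ≤ j')
    (h2 : j' ≤ pvRunEnd ys j) : pvRunEnd ys j' = pvRunEnd ys j := by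
  obtain ⟨hall, hstop⟩ := pvRunEnd_conds ys j
  exact pvRunEnd_eq_of ys j' (pvRunEnd ys j) h2
    (fun k hk1 hk2 => hall k (by omega) hk2) hstop

-- slice facts used below
theorem pvSlice_nil (ys : List Int) (a : Int) (ha : 0 ≤ a) :
    PySem.List.slice ys (some a) (some a) = [] := by
  rw [PySem.List.slice_toNat ys ha ha]; simp

theorem pvSlice_cons (ys : List Int) (a b : Int) (h0 : 0 ≤ a)
    (h1 : a < (ys.length : Int)) (h2 : a < b) :
    PySem.List.slice ys (some a) (some b) =
      PySem.List.pyGetD ys a 0 :: PySem.List.slice ys (some (a + 1)) (some b) := by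
  rw [PySem.List.slice_toNat ys h0 (by omega), PySem.List.slice_toNat ys (by omega : (0:Int) ≤ a + 1) (by omega),
      PySem.List.pyGetD_eq_getElem ys 0 h0 h1]
  have hA : a.toNat < ys.length := by omega
  have e1 : (a + 1).toNat = a.toNat + 1 := by omega
  have h3 : b.toNat - a.toNat = (b.toNat - (a.toNat + 1)) + 1 := by omega
  rw [e1, h3, List.drop_eq_getElem_cons hA, List.take_succ_cons]

theorem pvSlice_append (ys : List Int) (a b c : Int) (h0 : 0 ≤ a) (h1 : a ≤ b) (h2 : b ≤ c) :
    PySem.List.slice ys (some a) (some c) =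
      PySem.List.slice ys (some a) (some b) ++ PySem.List.slice ys (some b) (some c) := by
  rw [PySem.List.slice_toNat ys h0 (by omega), PySem.List.slice_toNat ys h0 (by omega),
      PySem.List.slice_toNat ys (by omega : (0:Int) ≤ b) (by omega)]
  have h3 : c.toNat - a.toNat = (b.toNat - a.toNat) + (c.toNat - b.toNat) := by omega
  rw [h3, List.take_add, List.drop_drop]
  congr 3
  omega

theorem pvUpdate_of_forall_mem (s : PySem.Set Int) (l : List Int)
    (h : ∀ x ∈ l, x ∈ s) : s.update l = s := by
  rw [PySem.Set.update_eq_append_filter]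
  have : List.filter (fun y => !s.contains y) (PySem.Set.ofList l) = [] := by
    rw [List.filter_eq_nil_iff]
    intro y hy
    have hys : y ∈ s := h y ((PySem.Set.mem_ofList l y).mp hy)
    simp [PySem.Set.contains_eq_listContains, hys]
  rw [this, List.append_nil]

-- A's run extension is exactly one set-update with the rest of the run
theorem pvExtendA_eq_update (ys : List Int) (j : Int) (hj : 0 ≤ j) (s : PySem.Set Int) :
    pvExtendA ys j s = s.update (PySem.List.slice ys (some j) (some (pvRunEnd ys j))) := by
  revert hj
  induction j, s using pvExtendA.induct (ys := ys) with
  | case1 j s h ih =>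
      intro hj
      conv_lhs => rw [pvExtendA, dif_pos h]
      rw [ih (by omega), pvRunEnd_eq_pos ys j h]
      have hr : j + 1 ≤ pvRunEnd ys (j + 1) := pvRunEnd_ge ys (j + 1)
      rw [pvSlice_cons ys j (pvRunEnd ys (j + 1)) hj h.1 (by omega),
          PySem.Set.update_cons]
  | case2 j s h =>
      intro hj
      conv_lhs => rw [pvExtendA, dif_neg h]
      rw [pvRunEnd_eq_neg ys j h, pvSlice_nil ys j hj, PySem.Set.update_nil]

-- A's window test is a telescoped consecutive-difference test
theorem pvWindowOk_iff (ys : List Int) (i m : Int) (_hm : 0 ≤ m) :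
    pvWindowOk ys i m = true ↔
      ∀ k, i < k → k < i + m →
        PySem.List.pyGetD ys k 0 - PySem.List.pyGetD ys (k - 1) 0 = 1 := by
  unfold pvWindowOk
  rw [List.all_eq_true]
  constructor
  · intro hall k hk1 hk2
    have e1 := hall k (by rw [PySem.List.mem_pyRange_one]; omega)
    have e2 := hall (k - 1) (by rw [PySem.List.mem_pyRange_one]; omega)
    rw [beq_iff_eq] at e1 e2
    omega
  · intro hstep j hj
    rw [PySem.List.mem_pyRange_one] at hj
    rw [beq_iff_eq]
    -- telescoping: induction on the distance from i
    have aux : ∀ t : Nat, i + t < i + m →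
        PySem.List.pyGetD ys (i + t) 0 - PySem.List.pyGetD ys i 0 = t := by
      intro t
      induction t with
      | zero => intro _; simp
      | succ u ihu =>
          intro hlt
          have e := hstep (i + u + 1) (by omega) (by push_cast at hlt ⊢; omega)
          have e2 := ihu (by push_cast at hlt ⊢; omega)
          have e3 : (i + u + 1) - 1 = i + u := by ring
          rw [e3] at e
          push_cast
          have e4 : i + ((u : Int) + 1) = i + (u : Int) + 1 := by ring
          rw [e4]
          omega
    have ht : j = i + ((j - i).toNat : Int) := by omega
    rw [ht]
    have := aux (j - i).toNat (by omega)
    rw [this]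
    omega

theorem pvFoldl_fixed (f : PySem.Set Int → Int → PySem.Set Int) (s : PySem.Set Int)
    (l : List Int) (h : ∀ i ∈ l, f s i = s) : l.foldl f s = s := by
  induction l with
  | nil => rfl
  | cons x xs ih =>
      rw [List.foldl_cons, h x List.mem_cons_self]
      exact ih (fun i hi => h i (List.mem_cons_of_mem x hi))

-- runs shorter than m contribute nothing once fewer than m positions remain
theorem pvSweepB_tail (ys : List Int) (m : Int) :
    ∀ (fuel : Nat) (q : Int) (s : PySem.Set Int),
      (((ys.length : Int) - q).toNat ≤ fuel) → (ys.length : Int) - m < q →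
      pvSweepB ys m q s = s := by
  intro fuel
  induction fuel with
  | zero =>
      intro q s hf hq
      exact pvSweepB_eq_neg ys m q s (by omega)
  | succ fl ih =>
      intro q s hf hq
      by_cases hqn : q < (ys.length : Int)
      · have hr1 : q + 1 ≤ pvRunEnd ys (q + 1) := pvRunEnd_ge ys (q + 1)
        have hr2 : pvRunEnd ys (q + 1) ≤ (ys.length : Int) :=
          pvRunEnd_le ys (q + 1) (by omega)
        rw [pvSweepB_eq_pos ys m q s hqn, if_neg (by omega)]
        exact ih (pvRunEnd ys (q + 1)) s (by omega) (by omega)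
      · exact pvSweepB_eq_neg ys m q s hqn

-- main loop correspondence
theorem pvMain (ys : List Int) (m : Int) (hm : 1 ≤ m) :
    ∀ (fuel : Nat) (p : Int) (s : PySem.Set Int), 0 ≤ p →
      (((ys.length : Int) - p).toNat ≤ fuel) →
      (PySem.List.pyRange p ((ys.length : Int) - m + 1) 1).foldl (pvStepA ys m) s =
        pvSweepB ys m p s := by
  intro fuel
  induction fuel with
  | zero =>
      intro p s hp hf
      rw [PySem.List.pyRange_one_eq_nil (by omega), List.foldl_nil,
          pvSweepB_eq_neg ys m p s (by omega)]
  | succ fl ih =>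
      intro p s hp hf
      set n : Int := (ys.length : Int) with hn
      by_cases hpn : p < n
      swap
      · rw [PySem.List.pyRange_one_eq_nil (by omega), List.foldl_nil,
            pvSweepB_eq_neg ys m p s hpn]
      by_cases hpm : n - m < p
      · rw [PySem.List.pyRange_one_eq_nil (by omega), List.foldl_nil]
        exact (pvSweepB_tail ys m (fl + 1) p s hf hpm).symm
      set r : Int := pvRunEnd ys (p + 1) with hrdef
      have hr1 : p + 1 ≤ r := pvRunEnd_ge ys (p + 1)
      have hr2 : r ≤ n := pvRunEnd_le ys (p + 1) (by omega)
      obtain ⟨hconds, hstop⟩ := pvRunEnd_conds ys (p + 1)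
      rw [pvSweepB_eq_pos ys m p s hpn]
      by_cases hlong : m ≤ r - p
      · -- run of length ≥ m: the window at p inserts the whole run, later windows are no-ops
        rw [if_pos hlong]
        set s' := s.update (PySem.List.slice ys (some p) (some r)) with hs'
        set X := min r (n - m + 1) with hX
        have hpX : p < X := by omega
        have hX2 : X ≤ n - m + 1 := by omega
        rw [PySem.List.pyRange_one_append p X (n - m + 1) (by omega) hX2, List.foldl_append,
            PySem.List.pyRange_one_cons hpX, List.foldl_cons]
        have hWp : pvWindowOk ys p m = true := by
          rw [pvWindowOk_iff ys p m (by omega)]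
          intro k hk1 hk2
          exact (hconds k (by omega) (by omega)).2
        have hstep_p : pvStepA ys m s p = s' := by
          unfold pvStepA
          rw [if_pos hWp, pvExtendA_eq_update ys (p + m) (by omega)
                (s.update (PySem.List.slice ys (some p) (some (p + m)))),
              pvRunEnd_stable ys (p + 1) (p + m) (by omega) (by omega),
              ← PySem.Set.update_append,
              ← pvSlice_append ys p (p + m) r hp (by omega) (by omega)]
        rw [hstep_p]
        have hfix : (PySem.List.pyRange (p + 1) X 1).foldl (pvStepA ys m) s' = s' := by
          apply pvFoldl_fixed
          intro i hi
          rw [PySem.List.mem_pyRange_one] at hi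
          unfold pvStepA
          by_cases hW : pvWindowOk ys i m = true
          · rw [if_pos hW]
            have him : i + m ≤ r := by
              by_contra hc
              have hrn : r < n := by omega
              have := (pvWindowOk_iff ys i m (by omega)).mp hW r (by omega) (by omega)
              exact hstop ⟨by omega, this⟩
            rw [pvExtendA_eq_update ys (i + m) (by omega),
                pvRunEnd_stable ys (p + 1) (i + m) (by omega) (by omega),
                ← PySem.Set.update_append,
                ← pvSlice_append ys i (i + m) r (by omega) (by omega) (by omega)]
            apply pvUpdate_of_forall_mem
            intro x hx
            have hx' : x ∈ PySem.List.slice ys (some p) (some r) := by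
              rw [pvSlice_append ys p i r hp (by omega) (by omega)]
              exact List.mem_append_right _ hx
            rw [hs', PySem.Set.mem_update]
            exact Or.inr hx'
          · rw [if_neg hW]
        rw [hfix]
        by_cases hrX : r ≤ n - m + 1
        · have hXr : X = r := by omega
          rw [hXr]
          exact ih r s' (by omega) (by omega)
        · have hXe : X = n - m + 1 := by omega
          rw [hXe, PySem.List.pyRange_one_eq_nil (le_refl _), List.foldl_nil]
          exact (pvSweepB_tail ys m (fl + 1) r s' (by omega) (by omega)).symm
      · -- run shorter than m: every window starting in it fails, nothing is inserted
        rw [if_neg hlong]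
        set X := min r (n - m + 1) with hX
        have hpX : p ≤ X := by omega
        rw [PySem.List.pyRange_one_append p X (n - m + 1) hpX (by omega), List.foldl_append]
        have hfix : (PySem.List.pyRange p X 1).foldl (pvStepA ys m) s = s := by
          apply pvFoldl_fixed
          intro i hi
          rw [PySem.List.mem_pyRange_one] at hi
          have hW : ¬ pvWindowOk ys i m = true := by
            intro hWt
            have hrn : r < n := by omega
            have := (pvWindowOk_iff ys i m (by omega)).mp hWt r (by omega) (by omega)
            exact hstop ⟨by omega, this⟩
          unfold pvStepA
          rw [if_neg hW]
        rw [hfix]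
        by_cases hrX : r ≤ n - m + 1
        · have hXr : X = r := by omega
          rw [hXr]
          exact ih r s (by omega) (by omega)
        · have hXe : X = n - m + 1 := by omega
          rw [hXe, PySem.List.pyRange_one_eq_nil (le_refl _), List.foldl_nil]
          exact (pvSweepB_tail ys m (fl + 1) r s (by omega) (by omega)).symm

-- ===== VERDICT (by name: the statement is the Claim_ definition above) =====
theorem get_continuous_years_spec : Claim_equal_get_continuous_years := by
  intro years min_years _hdom hpre
  unfold Spec_get_continuous_years get_continuous_years get_continuous_years_alt
  exact pvMain (PySem.List.sorted years (fun y => y) false) min_years hpre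
    (((PySem.List.sorted years (fun y => y) false).length : Int) - 0).toNat 0
    PySem.Set.empty le_rfl le_rfl
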